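-- pv_equiv track=rewrite | github.com/ZXS66/zxs.leetcode.cn | pythontest/take_k_of_each_character_from_left_and_right_2516.py | takeCharacters
-- ===== SOURCE A (Python) =====
-- def takeCharacters(s: str, k: int) -> int:
--     cnt = [0] * 3
--
--     for c in s:
--         cnt[ord(c) - ord('a')] += 1
--     if cnt[0] < k or cnt[1] < k or cnt[2] < k:
--         return -1
--
--     ans = len(s)
--     l = 0
--     for r, ch in enumerate(s):
--         cnt[ord(ch) - ord('a')] -= 1
--         while l < r and (cnt[0] < k or cnt[1] < k or cnt[2] < k):
--             cnt[ord(s[l]) - ord('a')] += 1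
--             l += 1
--         if cnt[0] >= k and cnt[1] >= k and cnt[2] >= k:
--             ans = min(ans, len(s) - (r - l + 1))
--
--     return ans
-- ===== SOURCE B (Python) =====
-- def takeCharacters(s, k):
--     # Precompute, per letter class (ord(ch)-ord('a')) % 3, the list of positions
--     # of its occurrences.  For each prefix length i, the deepest suffix start j
--     # that keeps every class feasible is read off directly by indexing the
--     # occurrence list from its right end; no sliding window is needed.
--     n = len(s)
--     occ = ([], [], [])
--     pre = [0, 0, 0]
--     for i, ch in enumerate(s):
--         occ[(ord(ch) - ord('a')) % 3].append(i)
--     if len(occ[0]) < k or len(occ[1]) < k or len(occ[2]) < k: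
--         return -1
--     best = n
--     for i in range(n + 1):
--         j = n
--         for b in range(3):
--             if pre[b] < k:
--                 j = min(j, occ[b][pre[b] - k])  # the (k - pre[b])-th occurrence from the right
--         best = min(best, i + (n - j))
--         if i < n:
--             pre[(ord(s[i]) - ord('a')) % 3] += 1
--     return best
-- ===== Notes on version B (the rewrite author's own statement) =====
-- stated objective: alternative
-- what changed: A maximises a deletable middle window with a two-pointer sliding-window while-loop; B never slides a window: it precomputes per-letter-class occurrence-position lists and, for each prefix length, directly indexes the deepest feasible suffix start from the right end of those lists, minimising prefix+suffix length.
import Mathlib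
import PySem

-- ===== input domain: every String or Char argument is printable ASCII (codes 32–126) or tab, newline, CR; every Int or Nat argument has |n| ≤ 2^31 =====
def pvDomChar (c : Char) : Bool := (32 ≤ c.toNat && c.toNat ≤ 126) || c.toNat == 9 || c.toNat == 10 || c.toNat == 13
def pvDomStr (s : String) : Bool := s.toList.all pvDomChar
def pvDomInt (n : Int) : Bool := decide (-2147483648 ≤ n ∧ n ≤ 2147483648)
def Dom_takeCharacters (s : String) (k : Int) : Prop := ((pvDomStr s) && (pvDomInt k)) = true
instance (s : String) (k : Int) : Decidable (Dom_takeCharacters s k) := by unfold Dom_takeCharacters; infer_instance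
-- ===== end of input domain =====

-- B replaces A's two-pointer sliding middle window by per-letter-class occurrence-position
-- lists: for each prefix length the deepest feasible suffix start is read off by direct
-- indexing (objective: alternative decomposition, same cost).
-- Shared helper: Python's `cnt[ord(c) - ord('a')] += d` / `pre[(ord(c)-ord('a'))%3] += d`
-- on a 3-slot list.  Valid Python indices for A's list are -3..2 (negative ones wrap),
-- exactly (ord c - 97) mod 3; Lean's % on Int with positive divisor 3 coincides with
-- Python's %.  Any other character raises IndexError in A and is excluded by Pre_.
def pvBucket (c : Char) : Int := ((c.toNat : Int) - 97) % 3

def pvInc (x : Int × Int × Int) (t d : Int) : Int × Int × Int :=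
  if t = 0 then (x.1 + d, x.2.1, x.2.2)
  else if t = 1 then (x.1, x.2.1 + d, x.2.2)
  else (x.1, x.2.1, x.2.2 + d)

-- ===== PORT A =====
-- the counting loop `for c in s: cnt[ord(c)-ord('a')] += 1`
def pvCount (l : List Char) : Int × Int × Int :=
  l.foldl (fun x c => pvInc x (pvBucket c) 1) (0, 0, 0)

-- the `while l < r and (cnt[0] < k or cnt[1] < k or cnt[2] < k):` loop
def pvPullA (cs : List Char) (k : Int) (cnt : Int × Int × Int) (l r : Int) :
    (Int × Int × Int) × Int :=
  if h : l < r ∧ (cnt.1 < k ∨ cnt.2.1 < k ∨ cnt.2.2 < k) then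
    pvPullA cs k (pvInc cnt (pvBucket (PySem.List.pyGetD cs l 'a')) 1) (l + 1) r
  else (cnt, l)
termination_by (r - l).toNat
decreasing_by omega

-- one iteration of `for r, ch in enumerate(s):`; state = (cnt, l, ans)
def pvStepA (cs : List Char) (k : Int) (n : Int)
    (st : (Int × Int × Int) × Int × Int) (p : Int × Char) :
    (Int × Int × Int) × Int × Int :=
  let cnt := pvInc st.1 (pvBucket p.2) (-1)
  let q := pvPullA cs k cnt st.2.1 p.1
  (q.1, q.2,
    if k ≤ q.1.1 ∧ k ≤ q.1.2.1 ∧ k ≤ q.1.2.2 then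
      min st.2.2 (n - (p.1 - q.2 + 1))
    else st.2.2)

def takeCharacters (s : String) (k : Int) : Int :=
  let cs := s.toList
  let cnt := pvCount cs
  if cnt.1 < k ∨ cnt.2.1 < k ∨ cnt.2.2 < k then -1
  else
    let n : Int := (cs.length : Int)
    ((PySem.List.enumerate cs 0).foldl (pvStepA cs k n) (cnt, 0, n)).2.2

-- ===== PORT B =====
-- `occ[b].append(i)` on the triple of occurrence lists
def pvApp (o : List Int × List Int × List Int) (t : Int) (v : Int) :
    List Int × List Int × List Int :=
  if t = 0 then (o.1 ++ [v], o.2.1, o.2.2)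
  else if t = 1 then (o.1, o.2.1 ++ [v], o.2.2)
  else (o.1, o.2.1, o.2.2 ++ [v])

-- the build loop `for i, ch in enumerate(s): occ[...].append(i)`
def pvBuildB (cs : List Char) : List Int × List Int × List Int :=
  (PySem.List.enumerate cs 0).foldl (fun o p => pvApp o (pvBucket p.2) p.1) ([], [], [])

-- `pre[b]` and `occ[b]` for b = 0, 1, 2
def pvCompI (t : Int) (x : Int × Int × Int) : Int :=
  if t = 0 then x.1 else if t = 1 then x.2.1 else x.2.2

def pvOccC (t : Int) (o : List Int × List Int × List Int) : List Int :=
  if t = 0 then o.1 else if t = 1 then o.2.1 else o.2.2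

-- the inner loop `for b in range(3): if pre[b] < k: j = min(j, occ[b][pre[b] - k])`
def pvInnerB (k n : Int) (occ : List Int × List Int × List Int)
    (pre : Int × Int × Int) : Int :=
  (PySem.List.pyRange 0 3 1).foldl
    (fun j b =>
      if pvCompI b pre < k then
        min j (PySem.List.pyGetD (pvOccC b occ) (pvCompI b pre - k) 0)
      else j) n

-- one iteration of `for i in range(n + 1):`; state = (pre, best)
def pvStepBB (cs : List Char) (k : Int) (n : Int)
    (occ : List Int × List Int × List Int)
    (st : (Int × Int × Int) × Int) (i : Int) : (Int × Int × Int) × Int :=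
  let j := pvInnerB k n occ st.1
  let best := min st.2 (i + (n - j))
  (if i < n then pvInc st.1 (pvBucket (PySem.List.pyGetD cs i 'a')) 1 else st.1, best)

def takeCharacters_alt (s : String) (k : Int) : Int :=
  let cs := s.toList
  let occ := pvBuildB cs
  if (occ.1.length : Int) < k ∨ (occ.2.1.length : Int) < k ∨ (occ.2.2.length : Int) < k then -1
  else
    let n : Int := (cs.length : Int)
    ((PySem.List.pyRange 0 (n + 1) 1).foldl (pvStepBB cs k n occ) ((0, 0, 0), n)).2

-- ===== PRECONDITION & SPEC =====
-- Pre_ excludes exactly the inputs on which Python's A raises IndexError (a character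
-- other than '^'..'c' indexes A's 3-slot count list out of range).
def Pre_takeCharacters (s : String) (k : Int) : Prop :=
  (s.toList.all (fun c => 94 ≤ c.toNat && c.toNat ≤ 99)) = true

instance (s : String) (k : Int) : Decidable (Pre_takeCharacters s k) := by
  unfold Pre_takeCharacters; infer_instance

def pvWitness_takeCharacters : String × Int := ("abc", 1)

def Spec_takeCharacters (s : String) (k : Int) (out : Int) : Prop := out = takeCharacters_alt s k
instance (s : String) (k : Int) (out : Int) : Decidable (Spec_takeCharacters s k out) := by
  unfold Spec_takeCharacters; infer_instance

-- ===== CLAIM (what is proved, stated in full; the proofs are below) =====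
def Claim_equal_takeCharacters : Prop := ∀ (s : String) (k : Int), Dom_takeCharacters s k → Pre_takeCharacters s k → Spec_takeCharacters s k (takeCharacters s k)

-- ===== LEMMAS AND PROOFS =====

-- counts of one character
def pvU (c : Char) : Int × Int × Int := pvInc (0, 0, 0) (pvBucket c) 1

def pvFeas (k : Int) (x : Int × Int × Int) : Prop :=
  k ≤ x.1 ∧ k ≤ x.2.1 ∧ k ≤ x.2.2

def pvLe (x y : Int × Int × Int) : Prop :=
  x.1 ≤ y.1 ∧ x.2.1 ≤ y.2.1 ∧ x.2.2 ≤ y.2.2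

-- counts kept when the first i and the last (length - j) characters are taken
def pvKept (cs : List Char) (i j : Nat) : Int × Int × Int :=
  pvCount (cs.take i) + pvCount (cs.drop j)

-- candidate values i + (n - j) over feasible splits lo ≤ i ≤ j ≤ hi
def pvSBet (cs : List Char) (k : Int) (lo hi : Nat) (v : Int) : Prop :=
  ∃ i j : Nat, lo ≤ i ∧ i ≤ j ∧ j ≤ hi ∧ pvFeas k (pvKept cs i j) ∧
    v = (i : Int) + ((cs.length : Int) - (j : Int))

def pvLeast (P : Int → Prop) (v : Int) : Prop := P v ∧ ∀ w, P w → v ≤ w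

theorem pvLeast_unique {P : Int → Prop} {v w : Int}
    (hv : pvLeast P v) (hw : pvLeast P w) : v = w :=
  le_antisymm (hv.2 w hw.1) (hw.2 v hv.1)

theorem pvZero_eq : ((0, 0, 0) : Int × Int × Int) = 0 := rfl

theorem pvInc_split (x : Int × Int × Int) (t d : Int) :
    pvInc x t d = x + pvInc (0, 0, 0) t d := by
  obtain ⟨a, b, c⟩ := x
  unfold pvInc
  split_ifs <;> simp [Prod.ext_iff]

theorem pvInc_cancel (t : Int) :
    pvInc (0, 0, 0) t 1 + pvInc (0, 0, 0) t (-1) = 0 := by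
  unfold pvInc
  split_ifs <;> simp [Prod.ext_iff]

theorem pvInc_neg (t : Int) :
    pvInc (0, 0, 0) t (-1) = -(pvInc (0, 0, 0) t 1) :=
  add_eq_zero_iff_eq_neg'.mp (pvInc_cancel t)

theorem pvCount_nil : pvCount [] = ((0 : Int), (0 : Int), (0 : Int)) := rfl

theorem pvCount_def (l : List Char) :
    pvCount l = l.foldl (fun x c => pvInc x (pvBucket c) 1) (0, 0, 0) := rfl

theorem pvCount_foldl (l : List Char) (x : Int × Int × Int) :
    l.foldl (fun a c => pvInc a (pvBucket c) 1) x = x + pvCount l := by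
  induction l generalizing x with
  | nil => simp [pvCount]
  | cons c l ih =>
      have hc : pvCount (c :: l) = pvInc (0, 0, 0) (pvBucket c) 1 + pvCount l := by
        rw [pvCount_def, List.foldl_cons, ih]
      rw [List.foldl_cons, ih, pvInc_split x, hc]
      abel

theorem pvCount_cons (c : Char) (l : List Char) :
    pvCount (c :: l) = pvU c + pvCount l := by
  rw [pvCount_def, List.foldl_cons, pvCount_foldl]
  rfl

theorem pvCount_append (a b : List Char) :
    pvCount (a ++ b) = pvCount a + pvCount b := by
  rw [pvCount_def (a ++ b), List.foldl_append, pvCount_foldl, ← pvCount_def]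

theorem pvU_nonneg (c : Char) : pvLe (0, 0, 0) (pvU c) := by
  unfold pvU pvInc pvLe
  split_ifs <;> simp

theorem pvLe_add {x x' y y' : Int × Int × Int} (h1 : pvLe x x') (h2 : pvLe y y') :
    pvLe (x + y) (x' + y') := by
  obtain ⟨a, b, c⟩ := x; obtain ⟨a', b', c'⟩ := x'
  obtain ⟨d, e, f⟩ := y; obtain ⟨d', e', f'⟩ := y'
  unfold pvLe at *
  simp at *
  omega

theorem pvLe_refl (x : Int × Int × Int) : pvLe x x := ⟨le_refl _, le_refl _, le_refl _⟩

theorem pvCount_nonneg (l : List Char) : pvLe (0, 0, 0) (pvCount l) := by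
  induction l with
  | nil => exact ⟨le_refl _, le_refl _, le_refl _⟩
  | cons c l ih =>
      rw [pvCount_cons]
      have h := pvLe_add (pvU_nonneg c) ih
      rw [pvZero_eq, add_zero] at h
      exact h

theorem pvLe_add_left (y : Int × Int × Int) {z : Int × Int × Int}
    (hz : pvLe (0, 0, 0) z) : pvLe y (z + y) := by
  have h := pvLe_add hz (pvLe_refl y)
  rw [pvZero_eq, zero_add] at h
  exact h

theorem pvFeas_mono {k : Int} {x y : Int × Int × Int} (h : pvLe x y)
    (hf : pvFeas k x) : pvFeas k y := by
  unfold pvLe at h; unfold pvFeas at *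
  omega

theorem pvNotFeas_iff (k : Int) (x : Int × Int × Int) :
    (x.1 < k ∨ x.2.1 < k ∨ x.2.2 < k) ↔ ¬ pvFeas k x := by
  unfold pvFeas; omega

-- prefix/suffix count identities
theorem pvPre_succ (cs : List Char) (i : Nat) (h : i < cs.length) :
    pvCount (cs.take (i + 1)) = pvCount (cs.take i) + pvU cs[i] := by
  have h1 : cs.take (i + 1) = cs.take i ++ [cs[i]] := by
    rw [List.take_succ, List.getElem?_eq_getElem h]
    rfl
  rw [h1, pvCount_append, pvCount_cons, pvCount_nil, pvZero_eq, add_zero]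

theorem pvSuf_succ (cs : List Char) (j : Nat) (h : j < cs.length) :
    pvCount (cs.drop j) = pvU cs[j] + pvCount (cs.drop (j + 1)) := by
  rw [List.drop_eq_getElem_cons h, pvCount_cons]

theorem pvKept_diag (cs : List Char) (i : Nat) : pvKept cs i i = pvCount cs := by
  unfold pvKept
  rw [← pvCount_append, List.take_append_drop]

theorem pvSuf_anti (cs : List Char) {j j' : Nat} (h : j ≤ j') :
    pvLe (pvCount (cs.drop j')) (pvCount (cs.drop j)) := by
  have h1 := List.take_append_drop (j' - j) (cs.drop j)
  rw [List.drop_drop] at h1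
  rw [show j + (j' - j) = j' from by omega] at h1
  rw [← h1, pvCount_append]
  exact pvLe_add_left _ (pvCount_nonneg _)

theorem pvKeptR_anti (cs : List Char) (i : Nat) {j j' : Nat} (h : j ≤ j') :
    pvLe (pvKept cs i j') (pvKept cs i j) :=
  pvLe_add (pvLe_refl _) (pvSuf_anti cs h)

-- dropping character cs[m] from the suffix side
theorem pvKept_dec_suf (cs : List Char) (l m : Nat) (h : m < cs.length) :
    pvInc (pvKept cs l m) (pvBucket cs[m]) (-1) = pvKept cs l (m + 1) := by
  unfold pvKept
  rw [pvSuf_succ cs m h, pvInc_split, pvInc_neg]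
  unfold pvU
  abel

-- adding character cs[l] back to the prefix side
theorem pvKept_inc_pre (cs : List Char) (l j : Nat) (h : l < cs.length) :
    pvInc (pvKept cs l j) (pvBucket cs[l]) 1 = pvKept cs (l + 1) j := by
  unfold pvKept
  rw [pvPre_succ cs l h, pvInc_split]
  unfold pvU
  abel

theorem pvSBet_le_hi {cs : List Char} {k : Int} {lo hi hi' : Nat} {v : Int}
    (h : hi ≤ hi') (hv : pvSBet cs k lo hi v) : pvSBet cs k lo hi' v := by
  obtain ⟨i, j, h0, h1, h2, h3, h4⟩ := hv
  exact ⟨i, j, h0, h1, le_trans h2 h, h3, h4⟩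

theorem pvSBet_top (cs : List Char) (k : Int) (hglob : pvFeas k (pvCount cs))
    {lo hi : Nat} (hlohi : lo ≤ hi) :
    pvSBet cs k lo hi ((cs.length : Int)) := by
  refine ⟨hi, hi, hlohi, le_rfl, le_rfl, ?_, by omega⟩
  rw [pvKept_diag]
  exact hglob

theorem pullA_spec (cs : List Char) (k : Int) (m : Nat) (hm : m < cs.length) :
    ∀ (fuel l : Nat), m - l ≤ fuel → l ≤ m →
    (∀ i, i < l → ¬ pvFeas k (pvKept cs i (m + 1))) →
    ∃ l' : Nat, l ≤ l' ∧ l' ≤ m ∧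
      pvPullA cs k (pvKept cs l (m + 1)) (l : Int) (m : Int) = (pvKept cs l' (m + 1), (l' : Int)) ∧
      (∀ i, i < l' → ¬ pvFeas k (pvKept cs i (m + 1))) ∧
      (pvFeas k (pvKept cs l' (m + 1)) ∨ l' = m) := by
  intro fuel
  induction fuel with
  | zero =>
      intro l hfl hl hskip
      have hlm : l = m := by omega
      subst hlm
      refine ⟨l, le_rfl, le_rfl, ?_, hskip, Or.inr rfl⟩
      rw [pvPullA, dif_neg (fun h => lt_irrefl _ h.1)]
  | succ fuel ih =>
      intro l hfl hl hskip
      by_cases hfeas : pvFeas k (pvKept cs l (m + 1))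
      · refine ⟨l, le_rfl, hl, ?_, hskip, Or.inl hfeas⟩
        rw [pvPullA, dif_neg (fun h => (pvNotFeas_iff k _).mp h.2 hfeas)]
      · by_cases hlm : l = m
        · subst hlm
          refine ⟨l, le_rfl, le_rfl, ?_, hskip, Or.inr rfl⟩
          rw [pvPullA, dif_neg (fun h => lt_irrefl _ h.1)]
        · have hlm' : l < m := lt_of_le_of_ne hl hlm
          have hskip1 : ∀ i, i < l + 1 → ¬ pvFeas k (pvKept cs i (m + 1)) := by
            intro i hi
            rcases Nat.lt_succ_iff_lt_or_eq.mp hi with h | h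
            · exact hskip i h
            · subst h; exact hfeas
          obtain ⟨l', h1, h2, heq, hskip', hend⟩ := ih (l + 1) (by omega) (by omega) hskip1
          refine ⟨l', by omega, h2, ?_, hskip', hend⟩
          have hcond : ((l : Int) < (m : Int) ∧
              ((pvKept cs l (m + 1)).1 < k ∨ (pvKept cs l (m + 1)).2.1 < k ∨
                (pvKept cs l (m + 1)).2.2 < k)) :=
            ⟨by exact_mod_cast hlm', (pvNotFeas_iff k _).mpr hfeas⟩
          rw [pvPullA, dif_pos hcond]
          have hget : PySem.List.pyGetD cs ((l : Nat) : Int) 'a' = cs[l] := by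
            rw [PySem.List.pyGetD_natCast]
            exact List.getD_eq_getElem cs 'a' (by omega)
          rw [hget, pvKept_inc_pre cs l (m + 1) (by omega),
            show ((l : Int) + 1) = (((l + 1 : Nat)) : Int) from by push_cast; ring]
          exact heq

-- invariant of A's outer loop after processing the first m characters
def pvInvA (cs : List Char) (k : Int) (m : Nat)
    (st : (Int × Int × Int) × Int × Int) : Prop :=
  ∃ l : Nat, l ≤ m ∧ st.1 = pvKept cs l m ∧ st.2.1 = (l : Int) ∧
    (∀ i, i < l → ¬ pvFeas k (pvKept cs i m)) ∧
    pvLeast (pvSBet cs k 0 m) st.2.2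

theorem stepA_spec (cs : List Char) (k : Int) (hglob : pvFeas k (pvCount cs))
    (m : Nat) (hm : m < cs.length) (st : (Int × Int × Int) × Int × Int)
    (hinv : pvInvA cs k m st) :
    pvInvA cs k (m + 1) (pvStepA cs k (cs.length : Int) st ((m : Int), cs[m])) := by
  obtain ⟨l, hl, hcnt, hli, hskip, hleast⟩ := hinv
  have hskip1 : ∀ i, i < l → ¬ pvFeas k (pvKept cs i (m + 1)) := fun i hi hf =>
    hskip i hi (pvFeas_mono (pvKeptR_anti cs i (Nat.le_succ m)) hf)
  obtain ⟨l', hll', hl'm, heq, hskip', hend⟩ := pullA_spec cs k m hm m l (by omega) hl hskip1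
  simp only [pvStepA]
  rw [hcnt, hli, pvKept_dec_suf cs l m hm, heq]
  refine ⟨l', by omega, rfl, rfl, hskip', ?_⟩
  show pvLeast (pvSBet cs k 0 (m + 1))
    (if k ≤ (pvKept cs l' (m + 1)).1 ∧ k ≤ (pvKept cs l' (m + 1)).2.1 ∧
        k ≤ (pvKept cs l' (m + 1)).2.2 then
      min st.2.2 ((cs.length : Int) - ((m : Int) - (l' : Int) + 1))
    else st.2.2)
  by_cases hfe : pvFeas k (pvKept cs l' (m + 1))
  · have hfe' : k ≤ (pvKept cs l' (m + 1)).1 ∧ k ≤ (pvKept cs l' (m + 1)).2.1 ∧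
        k ≤ (pvKept cs l' (m + 1)).2.2 := hfe
    rw [if_pos hfe']
    constructor
    · rcases min_cases st.2.2 ((cs.length : Int) - ((m : Int) - (l' : Int) + 1)) with
        ⟨hmin, -⟩ | ⟨hmin, -⟩
      · rw [hmin]
        exact pvSBet_le_hi (Nat.le_succ m) hleast.1
      · rw [hmin]
        exact ⟨l', m + 1, Nat.zero_le _, by omega, le_rfl, hfe, by push_cast; ring⟩
    · rintro w ⟨i, j, h0, hij, hjm1, hfw, hwv⟩
      rcases Nat.lt_or_ge j (m + 1) with hj | hj
      · have hw : pvSBet cs k 0 m w := ⟨i, j, h0, hij, by omega, hfw, hwv⟩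
        exact le_trans (min_le_left _ _) (hleast.2 w hw)
      · have hj' : j = m + 1 := by omega
        subst hj'
        have hi : l' ≤ i := by
          by_contra hcon
          exact hskip' i (by omega) hfw
        refine le_trans (min_le_right _ _) ?_
        omega
  · have hfe' : ¬ (k ≤ (pvKept cs l' (m + 1)).1 ∧ k ≤ (pvKept cs l' (m + 1)).2.1 ∧
        k ≤ (pvKept cs l' (m + 1)).2.2) := hfe
    rw [if_neg hfe']
    have hl'm' : l' = m := hend.resolve_left hfe
    constructor
    · exact pvSBet_le_hi (Nat.le_succ m) hleast.1
    · rintro w ⟨i, j, h0, hij, hjm1, hfw, hwv⟩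
      rcases Nat.lt_or_ge j (m + 1) with hj | hj
      · exact hleast.2 w ⟨i, j, h0, hij, by omega, hfw, hwv⟩
      · have hj' : j = m + 1 := by omega
        subst hj'
        rcases Nat.lt_or_ge i (m + 1) with hi | hi
        · exfalso
          rcases Nat.lt_or_ge i l' with hi2 | hi2
          · exact hskip' i hi2 hfw
          · have : i = l' := by omega
            subst this
            exact hfe hfw
        · have : i = m + 1 := by omega
          subst this
          have hn : st.2.2 ≤ (cs.length : Int) :=
            hleast.2 _ (pvSBet_top cs k hglob (Nat.zero_le m))
          omega

theorem loopA_spec (cs : List Char) (k : Int) (hglob : pvFeas k (pvCount cs)) :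
    ∀ m ≤ cs.length, pvInvA cs k m
      ((PySem.List.enumerate (cs.take m) 0).foldl (pvStepA cs k (cs.length : Int))
        (pvCount cs, 0, (cs.length : Int))) := by
  intro m
  induction m with
  | zero =>
      intro _
      simp only [List.take_zero, PySem.List.enumerate_nil, List.foldl_nil]
      refine ⟨0, le_rfl, (pvKept_diag cs 0).symm, rfl, by intro i hi; omega, ?_, ?_⟩
      · refine ⟨0, 0, le_rfl, le_rfl, le_rfl, by rw [pvKept_diag]; exact hglob, ?_⟩
        show ((cs.length : Int)) = ((0 : Nat) : Int) + ((cs.length : Int) - ((0 : Nat) : Int))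
        push_cast
        ring
      · rintro w ⟨i, j, h0, hij, hj0, hfw, hwv⟩
        show ((cs.length : Int)) ≤ w
        omega
  | succ m ih =>
      intro hm1
      have hm : m < cs.length := hm1
      have htake : cs.take (m + 1) = cs.take m ++ [cs[m]] := by
        rw [List.take_succ, List.getElem?_eq_getElem hm]
        rfl
      rw [htake, PySem.List.enumerate_append, List.foldl_append]
      have hlen : ((cs.take m).length : Int) = (m : Int) := by
        simp [List.length_take]
        omega
      rw [hlen]
      simp only [PySem.List.enumerate_cons, PySem.List.enumerate_nil, List.foldl_cons,
        List.foldl_nil, zero_add]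
      exact stepA_spec cs k hglob m hm _ (ih (le_of_lt hm))

-- ===================== B-side lemmas =====================

-- positions (0-based, offset ofs) of the characters of class t
def pvPosL (t : Int) : List Char → Nat → List Nat
  | [], _ => []
  | c :: l, ofs =>
      if pvBucket c = t then ofs :: pvPosL t l (ofs + 1) else pvPosL t l (ofs + 1)

-- number of characters of class t
def pvCntN (t : Int) (l : List Char) : Nat := l.countP (fun c => pvBucket c == t)

theorem pvBucket_range (c : Char) : 0 ≤ pvBucket c ∧ pvBucket c < 3 :=
  ⟨Int.emod_nonneg _ (by norm_num), Int.emod_lt_of_pos _ (by norm_num)⟩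

theorem pvCntN_cons (t : Int) (c : Char) (l : List Char) :
    pvCntN t (c :: l) = pvCntN t l + (if pvBucket c = t then 1 else 0) := by
  unfold pvCntN
  rw [List.countP_cons]
  by_cases h : pvBucket c = t <;> simp [h]

theorem pvPosL_length (t : Int) (l : List Char) :
    ∀ ofs, (pvPosL t l ofs).length = pvCntN t l := by
  induction l with
  | nil => intro ofs; simp [pvPosL, pvCntN]
  | cons c l ih =>
      intro ofs
      rw [pvCntN_cons]
      unfold pvPosL
      by_cases h : pvBucket c = t <;> simp [h, ih]

theorem pvPosL_shift (t : Int) (l : List Char) :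
    ∀ ofs, pvPosL t l (ofs + 1) = (pvPosL t l ofs).map (· + 1) := by
  induction l with
  | nil => intro ofs; simp [pvPosL]
  | cons c l ih =>
      intro ofs
      unfold pvPosL
      by_cases h : pvBucket c = t <;> simp [h, ih (ofs + 1)]

theorem pvCompI_add (t : Int) (x y : Int × Int × Int) :
    pvCompI t (x + y) = pvCompI t x + pvCompI t y := by
  obtain ⟨a, b, c⟩ := x; obtain ⟨d, e, f⟩ := y
  unfold pvCompI
  split_ifs <;> rfl

theorem pvCompI_zero (t : Int) : pvCompI t ((0, 0, 0) : Int × Int × Int) = 0 := by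
  unfold pvCompI; split_ifs <;> rfl

theorem pvCompI_pvU (t : Int) (ht : t = 0 ∨ t = 1 ∨ t = 2) (c : Char) :
    pvCompI t (pvU c) = if pvBucket c = t then 1 else 0 := by
  have hb := pvBucket_range c
  have hb3 : pvBucket c = 0 ∨ pvBucket c = 1 ∨ pvBucket c = 2 := by omega
  unfold pvU pvInc pvCompI
  rcases ht with h | h | h <;> rcases hb3 with h2 | h2 | h2 <;>
    subst h <;> simp [h2]

theorem pvCompI_count (t : Int) (ht : t = 0 ∨ t = 1 ∨ t = 2) (l : List Char) :
    pvCompI t (pvCount l) = (pvCntN t l : Int) := by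
  induction l with
  | nil => rw [pvCount_nil, pvCompI_zero]; simp [pvCntN]
  | cons c l ih =>
      rw [pvCount_cons, pvCompI_add, pvCompI_pvU t ht, ih, pvCntN_cons]
      by_cases h : pvBucket c = t <;> simp [h] <;> push_cast <;> ring

theorem pvFeas_comp (k : Int) (x : Int × Int × Int) :
    pvFeas k x ↔ (k ≤ pvCompI 0 x ∧ k ≤ pvCompI 1 x ∧ k ≤ pvCompI 2 x) := by
  unfold pvFeas pvCompI
  norm_num

-- the key index/count duality for occurrence positions
theorem pvPosL_lt_iff (t : Int) (cs : List Char) :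
    ∀ (m j : Nat) (hm : m < (pvPosL t cs 0).length),
      ((pvPosL t cs 0)[m] < j ↔ m + 1 ≤ pvCntN t (cs.take j)) := by
  induction cs with
  | nil => intro m j hm; simp [pvPosL] at hm
  | cons c l ih =>
      intro m j hm
      have hshift : pvPosL t l (0 + 1) = (pvPosL t l 0).map (· + 1) := pvPosL_shift t l 0
      by_cases hb : pvBucket c = t
      · simp only [pvPosL, if_pos hb, hshift] at hm ⊢
        cases m with
        | zero =>
            cases j with
            | zero => simp [pvCntN]
            | succ j' =>
                simp only [List.take_succ_cons, pvCntN_cons, if_pos hb]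
                simp
        | succ m' =>
            simp only [List.length_cons, List.length_map] at hm
            have hm' : m' < (pvPosL t l 0).length := by omega
            cases j with
            | zero =>
                simp [pvCntN]
            | succ j' =>
                have hIH := ih m' j' hm'
                simp only [List.getElem_cons_succ, List.getElem_map,
                  List.take_succ_cons, pvCntN_cons, if_pos hb]
                omega
      · simp only [pvPosL, if_neg hb, hshift] at hm ⊢
        simp only [List.length_map] at hm
        cases j with
        | zero =>
            simp [pvCntN]
        | succ j' =>
            have hIH := ih m j' hm
            simp only [List.getElem_map, List.take_succ_cons, pvCntN_cons, if_neg hb]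
            omega

theorem pvBuildB_eq_aux (l : List Char) :
    ∀ (ofs : Nat) (acc : List Int × List Int × List Int),
      (PySem.List.enumerate l (ofs : Int)).foldl (fun o p => pvApp o (pvBucket p.2) p.1) acc =
        (acc.1 ++ (pvPosL 0 l ofs).map (Nat.cast : Nat → Int),
         acc.2.1 ++ (pvPosL 1 l ofs).map (Nat.cast : Nat → Int),
         acc.2.2 ++ (pvPosL 2 l ofs).map (Nat.cast : Nat → Int)) := by
  induction l with
  | nil => intro ofs acc; simp [PySem.List.enumerate_nil, pvPosL]
  | cons c l ih =>
      intro ofs acc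
      rw [PySem.List.enumerate_cons, List.foldl_cons]
      have hcast : ((ofs : Int) + 1) = (((ofs + 1 : Nat)) : Int) := by push_cast; ring
      rw [hcast, ih (ofs + 1)]
      have hb := pvBucket_range c
      have hb3 : pvBucket c = 0 ∨ pvBucket c = 1 ∨ pvBucket c = 2 := by omega
      rcases hb3 with h | h | h <;>
        simp [pvApp, h, pvPosL, Prod.ext_iff]

theorem pvBuildB_eq (cs : List Char) :
    pvBuildB cs = ((pvPosL 0 cs 0).map (Nat.cast : Nat → Int),
      (pvPosL 1 cs 0).map (Nat.cast : Nat → Int),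
      (pvPosL 2 cs 0).map (Nat.cast : Nat → Int)) := by
  have h := pvBuildB_eq_aux cs 0 ([], [], [])
  simpa [pvBuildB] using h

theorem pvOccC_build (t : Int) (ht : t = 0 ∨ t = 1 ∨ t = 2) (cs : List Char) :
    pvOccC t (pvBuildB cs) = (pvPosL t cs 0).map (Nat.cast : Nat → Int) := by
  rw [pvBuildB_eq]
  rcases ht with h | h | h <;> subst h <;> rfl

-- per-class component of the kept counts
theorem pvCompI_kept (t : Int) (ht : t = 0 ∨ t = 1 ∨ t = 2) (cs : List Char)
    (i j : Nat) (hj : j ≤ cs.length) :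
    pvCompI t (pvKept cs i j) =
      (pvCntN t (cs.take i) : Int) + (pvCntN t cs : Int) - (pvCntN t (cs.take j) : Int) := by
  have hsplit : pvCntN t (cs.take j) + pvCntN t (cs.drop j) = pvCntN t cs := by
    unfold pvCntN
    rw [← List.countP_append, List.take_append_drop]
  unfold pvKept
  rw [pvCompI_add, pvCompI_count t ht, pvCompI_count t ht]
  omega

-- the per-class suffix bound: where `occ[b][pre[b]-k]` points, and what it means
theorem pvBound_spec (cs : List Char) (k : Int) (t : Int) (ht : t = 0 ∨ t = 1 ∨ t = 2)
    (hglob : pvFeas k (pvCount cs)) (i : Nat) (hi : i ≤ cs.length)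
    (hlt : pvCompI t (pvCount (cs.take i)) < k) :
    ∃ q : Nat,
      PySem.List.pyGetD (pvOccC t (pvBuildB cs)) (pvCompI t (pvCount (cs.take i)) - k) 0 = (q : Int) ∧
      i ≤ q ∧ q < cs.length ∧
      (∀ j : Nat, j ≤ cs.length → (j ≤ q ↔ k ≤ pvCompI t (pvKept cs i j))) := by
  have hpre := pvCompI_count t ht (cs.take i)
  have htot := pvCompI_count t ht cs
  have hktot : k ≤ (pvCntN t cs : Int) := by
    rw [← htot]
    rcases ht with h | h | h <;> subst h
    · exact ((pvFeas_comp k _).mp hglob).1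
    · exact ((pvFeas_comp k _).mp hglob).2.1
    · exact ((pvFeas_comp k _).mp hglob).2.2
  rw [hpre] at hlt
  set pre := pvCntN t (cs.take i) with hpredef
  set tot := pvCntN t cs with htotdef
  -- the negative Python index pre - k equals -(d) with d = (k - pre).toNat
  have hd0 : 0 < k - (pre : Int) := by omega
  set d : Nat := (k - (pre : Int)).toNat with hddef
  have hdI : (d : Int) = k - (pre : Int) := Int.toNat_of_nonneg (by omega)
  have hdle : d ≤ tot := by omega
  have hd1 : 1 ≤ d := by omega
  have hlenocc : (pvOccC t (pvBuildB cs)).length = tot := by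
    rw [pvOccC_build t ht, htotdef]
    simp [pvPosL_length]
  have hidx : (pre : Int) - k = -((d : Nat) : Int) := by omega
  have hmlt : tot - d < (pvPosL t cs 0).length := by
    rw [pvPosL_length]; omega
  have hget : PySem.List.pyGetD (pvOccC t (pvBuildB cs)) ((pre : Int) - k) 0 =
      (((pvPosL t cs 0)[tot - d] : Nat) : Int) := by
    rw [hidx, PySem.List.pyGetD_neg_natCast (pvOccC t (pvBuildB cs)) d 0 (by omega)
      (by rw [hlenocc]; omega)]
    simp [hlenocc, pvOccC_build t ht]
    simp [pvPosL_length, htotdef]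
  set q : Nat := (pvPosL t cs 0)[tot - d] with hqdef
  have hiff := pvPosL_lt_iff t cs (tot - d)
  have hcnt_take_len : pvCntN t (cs.take cs.length) = tot := by
    rw [List.take_length]
  refine ⟨q, by rw [hpre]; exact hget, ?_, ?_, ?_⟩
  · have h1 := hiff i hmlt
    by_contra hcon
    have h2 : tot - d + 1 ≤ pre := by
      rw [hpredef]
      exact h1.mp (by omega)
    omega
  · have h1 := hiff cs.length hmlt
    rw [hcnt_take_len] at h1
    exact h1.mpr (by omega)
  · intro j hj
    have h1 := hiff j hmlt
    rw [pvCompI_kept t ht cs i j hj, ← hpredef, ← htotdef]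
    constructor
    · intro hjq
      have h2 : ¬ (tot - d + 1 ≤ pvCntN t (cs.take j)) := by
        intro hcon
        exact absurd (h1.mpr hcon) (by omega)
      omega
    · intro hfeas
      by_contra hcon
      have h2 := h1.mp (by omega)
      omega

-- one `b` iteration of the inner loop, as a function, and its order characterisation
def pvStep3 (k : Int) (occ : List Int × List Int × List Int)
    (pre : Int × Int × Int) (x t : Int) : Int :=
  if pvCompI t pre < k then
    min x (PySem.List.pyGetD (pvOccC t occ) (pvCompI t pre - k) 0)
  else x

theorem pvStep3_le (k : Int) (occ : List Int × List Int × List Int)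
    (pre : Int × Int × Int) (x y t : Int) :
    x ≤ pvStep3 k occ pre y t ↔
      x ≤ y ∧ (pvCompI t pre < k →
        x ≤ PySem.List.pyGetD (pvOccC t occ) (pvCompI t pre - k) 0) := by
  unfold pvStep3
  split_ifs with h <;> simp [le_min_iff, h]

theorem pvCntN_take_le (t : Int) (cs : List Char) (j : Nat) :
    pvCntN t (cs.take j) ≤ pvCntN t cs := by
  unfold pvCntN
  exact (List.take_sublist j cs).countP_le

-- per class: the feasibility of a suffix start j, phrased through the inner loop's bound
theorem pvBkt_iff (cs : List Char) (k : Int) (t : Int) (ht : t = 0 ∨ t = 1 ∨ t = 2)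
    (hglob : pvFeas k (pvCount cs)) (i : Nat) (hi : i ≤ cs.length) :
    (∀ j : Nat, j ≤ cs.length →
      (k ≤ pvCompI t (pvKept cs i j) ↔
        (pvCompI t (pvCount (cs.take i)) < k →
          (j : Int) ≤ PySem.List.pyGetD (pvOccC t (pvBuildB cs))
            (pvCompI t (pvCount (cs.take i)) - k) 0))) ∧
    (pvCompI t (pvCount (cs.take i)) < k →
      (i : Int) ≤ PySem.List.pyGetD (pvOccC t (pvBuildB cs))
          (pvCompI t (pvCount (cs.take i)) - k) 0 ∧
        PySem.List.pyGetD (pvOccC t (pvBuildB cs))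
          (pvCompI t (pvCount (cs.take i)) - k) 0 ≤ (cs.length : Int)) := by
  by_cases hc : pvCompI t (pvCount (cs.take i)) < k
  · obtain ⟨q, hq, hiq, hqn, hiff⟩ := pvBound_spec cs k t ht hglob i hi hc
    refine ⟨?_, fun _ => by rw [hq]; constructor <;> omega⟩
    intro j hj
    rw [hq]
    constructor
    · intro hf _
      have := (hiff j hj).mpr hf
      omega
    · intro himp
      exact (hiff j hj).mp (by have := himp hc; omega)
  · refine ⟨?_, fun h => absurd h hc⟩
    intro j hj
    have hcomp := pvCompI_count t ht (cs.take i)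
    have hfeas : k ≤ pvCompI t (pvKept cs i j) := by
      rw [pvCompI_kept t ht cs i j hj]
      have hle := pvCntN_take_le t cs j
      omega
    constructor
    · intro _ hcon
      exact absurd hcon hc
    · intro _
      exact hfeas

-- the inner `for b in range(3)` loop computes the deepest feasible suffix start
theorem pvInnerB_spec (cs : List Char) (k : Int) (hglob : pvFeas k (pvCount cs))
    (i : Nat) (hi : i ≤ cs.length) :
    ∃ jN : Nat,
      pvInnerB k (cs.length : Int) (pvBuildB cs) (pvCount (cs.take i)) = (jN : Int) ∧
      i ≤ jN ∧ jN ≤ cs.length ∧ pvFeas k (pvKept cs i jN) ∧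
      (∀ j : Nat, i ≤ j → j ≤ cs.length → pvFeas k (pvKept cs i j) → j ≤ jN) := by
  have h3 : PySem.List.pyRange 0 3 1 = [0, 1, 2] := by decide
  have hfold : pvInnerB k (cs.length : Int) (pvBuildB cs) (pvCount (cs.take i)) =
      pvStep3 k (pvBuildB cs) (pvCount (cs.take i))
        (pvStep3 k (pvBuildB cs) (pvCount (cs.take i))
          (pvStep3 k (pvBuildB cs) (pvCount (cs.take i)) (cs.length : Int) 0) 1) 2 := by
    rw [pvInnerB, h3]
    rfl
  have hb0 := pvBkt_iff cs k 0 (Or.inl rfl) hglob i hi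
  have hb1 := pvBkt_iff cs k 1 (Or.inr (Or.inl rfl)) hglob i hi
  have hb2 := pvBkt_iff cs k 2 (Or.inr (Or.inr rfl)) hglob i hi
  set r := pvStep3 k (pvBuildB cs) (pvCount (cs.take i))
        (pvStep3 k (pvBuildB cs) (pvCount (cs.take i))
          (pvStep3 k (pvBuildB cs) (pvCount (cs.take i)) (cs.length : Int) 0) 1) 2 with hr
  have hchar : ∀ x : Int, x ≤ r ↔
      (x ≤ (cs.length : Int) ∧
       (pvCompI 0 (pvCount (cs.take i)) < k →
         x ≤ PySem.List.pyGetD (pvOccC 0 (pvBuildB cs)) (pvCompI 0 (pvCount (cs.take i)) - k) 0) ∧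
       (pvCompI 1 (pvCount (cs.take i)) < k →
         x ≤ PySem.List.pyGetD (pvOccC 1 (pvBuildB cs)) (pvCompI 1 (pvCount (cs.take i)) - k) 0) ∧
       (pvCompI 2 (pvCount (cs.take i)) < k →
         x ≤ PySem.List.pyGetD (pvOccC 2 (pvBuildB cs)) (pvCompI 2 (pvCount (cs.take i)) - k) 0)) := by
    intro x
    rw [hr, pvStep3_le, pvStep3_le, pvStep3_le]
    tauto
  have hir : (i : Int) ≤ r := by
    rw [hchar]
    exact ⟨by omega, fun h => (hb0.2 h).1, fun h => (hb1.2 h).1, fun h => (hb2.2 h).1⟩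
  have hrn : r ≤ (cs.length : Int) := ((hchar r).mp le_rfl).1
  have hr0 : 0 ≤ r := le_trans (by omega) hir
  refine ⟨r.toNat, ?_, ?_, ?_, ?_, ?_⟩
  · rw [hfold, Int.toNat_of_nonneg hr0]
  · omega
  · omega
  · have hjn : r.toNat ≤ cs.length := by omega
    rw [pvFeas_comp]
    have hself := (hchar r).mp le_rfl
    have hc : ((r.toNat : Nat) : Int) = r := Int.toNat_of_nonneg hr0
    refine ⟨?_, ?_, ?_⟩
    · exact (hb0.1 r.toNat hjn).mpr (fun h => by rw [hc]; exact hself.2.1 h)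
    · exact (hb1.1 r.toNat hjn).mpr (fun h => by rw [hc]; exact hself.2.2.1 h)
    · exact (hb2.1 r.toNat hjn).mpr (fun h => by rw [hc]; exact hself.2.2.2 h)
  · intro j hij hjn hf
    rw [pvFeas_comp] at hf
    have hjr : (j : Int) ≤ r := by
      rw [hchar]
      exact ⟨by omega, (hb0.1 j hjn).mp hf.1, (hb1.1 j hjn).mp hf.2.1,
        (hb2.1 j hjn).mp hf.2.2⟩
    omega

-- invariant of B's outer loop after processing prefix lengths 0 .. m-1
def pvInvBB (cs : List Char) (k : Int) (m : Nat) (st : (Int × Int × Int) × Int) : Prop :=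
  st.1 = pvCount (cs.take m) ∧
  pvLeast (fun v => v = (cs.length : Int) ∨
    ∃ i j : Nat, i < m ∧ i ≤ j ∧ j ≤ cs.length ∧ pvFeas k (pvKept cs i j) ∧
      v = (i : Int) + ((cs.length : Int) - (j : Int))) st.2

theorem stepBB_spec (cs : List Char) (k : Int) (hglob : pvFeas k (pvCount cs))
    (m : Nat) (hm : m ≤ cs.length) (st : (Int × Int × Int) × Int)
    (hinv : pvInvBB cs k m st) :
    pvInvBB cs k (m + 1) (pvStepBB cs k (cs.length : Int) (pvBuildB cs) st (m : Int)) := by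
  obtain ⟨hpre, hleast⟩ := hinv
  obtain ⟨jN, hjeq, hijN, hjNn, hfeasN, hmax⟩ := pvInnerB_spec cs k hglob m hm
  simp only [pvStepBB]
  rw [hpre, hjeq]
  refine ⟨?_, ?_⟩
  · by_cases hmn : (m : Int) < (cs.length : Int)
    · rw [if_pos hmn]
      have hmn' : m < cs.length := by exact_mod_cast hmn
      have hget : PySem.List.pyGetD cs ((m : Nat) : Int) 'a' = cs[m] := by
        rw [PySem.List.pyGetD_natCast]
        exact List.getD_eq_getElem cs 'a' hmn'
      rw [hget, pvInc_split, pvPre_succ cs m hmn']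
      rfl
    · rw [if_neg hmn]
      have hml : m = cs.length := by omega
      rw [hml, List.take_length, List.take_of_length_le (by omega)]
  · constructor
    · rcases min_cases st.2 ((m : Int) + ((cs.length : Int) - (jN : Int))) with
        ⟨hmin, -⟩ | ⟨hmin, -⟩
      · rw [hmin]
        rcases hleast.1 with h | ⟨i, j, hi, hij, hjn, hf, hv⟩
        · exact Or.inl h
        · exact Or.inr ⟨i, j, by omega, hij, hjn, hf, hv⟩
      · rw [hmin]
        exact Or.inr ⟨m, jN, by omega, hijN, hjNn, hfeasN, rfl⟩
    · rintro w (h | ⟨i, j, hi, hij, hjn, hf, hv⟩)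
      · exact le_trans (min_le_left _ _) (hleast.2 w (Or.inl h))
      · rcases Nat.lt_or_ge i m with h2 | h2
        · exact le_trans (min_le_left _ _) (hleast.2 w (Or.inr ⟨i, j, h2, hij, hjn, hf, hv⟩))
        · have him : i = m := by omega
          subst him
          have hjle := hmax j hij hjn hf
          refine le_trans (min_le_right _ _) ?_
          omega

theorem loopBB_spec (cs : List Char) (k : Int) (hglob : pvFeas k (pvCount cs)) :
    ∀ m ≤ cs.length + 1, pvInvBB cs k m
      ((PySem.List.pyRange 0 (m : Int) 1).foldl (pvStepBB cs k (cs.length : Int) (pvBuildB cs))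
        ((0, 0, 0), (cs.length : Int))) := by
  intro m
  induction m with
  | zero =>
      intro _
      rw [show ((0 : Nat) : Int) = 0 from rfl, PySem.List.pyRange_one_eq_nil (le_refl 0),
        List.foldl_nil]
      refine ⟨by rw [List.take_zero, pvCount_nil], ?_, ?_⟩
      · exact Or.inl rfl
      · rintro w (h | ⟨i, j, hi, hij, hjn, hf, hv⟩)
        · omega
        · omega
  | succ m ih =>
      intro hm1
      have hm : m ≤ cs.length := by omega
      have hcast : ((m + 1 : Nat) : Int) = ((m : Nat) : Int) + 1 := by push_cast; ring
      rw [hcast, PySem.List.pyRange_one_succ_right (by omega), List.foldl_append,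
        List.foldl_cons, List.foldl_nil]
      exact stepBB_spec cs k hglob m hm _ (ih (by omega))

-- ===== VERDICT (by name: the statement is the Claim_ definition above) =====
theorem takeCharacters_spec : Claim_equal_takeCharacters := by
  intro s k _hdom _hpre
  unfold Spec_takeCharacters takeCharacters takeCharacters_alt
  set cs := s.toList with hcs
  have hlen0 : ((pvBuildB cs).1.length : Int) = (pvCount cs).1 := by
    have h := pvCompI_count 0 (Or.inl rfl) cs
    rw [pvCompI] at h
    norm_num at h
    rw [pvBuildB_eq]
    simp [pvPosL_length, h]
  have hlen1 : ((pvBuildB cs).2.1.length : Int) = (pvCount cs).2.1 := by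
    have h := pvCompI_count 1 (Or.inr (Or.inl rfl)) cs
    rw [pvCompI] at h
    norm_num at h
    rw [pvBuildB_eq]
    simp [pvPosL_length, h]
  have hlen2 : ((pvBuildB cs).2.2.length : Int) = (pvCount cs).2.2 := by
    have h := pvCompI_count 2 (Or.inr (Or.inr rfl)) cs
    rw [pvCompI] at h
    norm_num at h
    rw [pvBuildB_eq]
    simp [pvPosL_length, h]
  by_cases hif : (pvCount cs).1 < k ∨ (pvCount cs).2.1 < k ∨ (pvCount cs).2.2 < k
  · rw [if_pos hif, if_pos (by rw [hlen0, hlen1, hlen2]; exact hif)]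
  · rw [if_neg hif, if_neg (by rw [hlen0, hlen1, hlen2]; exact hif)]
    have hglob : pvFeas k (pvCount cs) := by
      by_contra hcon
      exact hif ((pvNotFeas_iff k (pvCount cs)).mpr hcon)
    have hA := loopA_spec cs k hglob cs.length le_rfl
    rw [List.take_length] at hA
    obtain ⟨lA, -, -, -, -, hleastA⟩ := hA
    have hB := loopBB_spec cs k hglob (cs.length + 1) (by omega)
    obtain ⟨-, hleastB⟩ := hB
    have hcast : (((cs.length + 1 : Nat)) : Int) = (cs.length : Int) + 1 := by push_cast; ring
    rw [hcast] at hleastB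
    have hBleast : pvLeast (pvSBet cs k 0 cs.length)
        (((PySem.List.pyRange 0 ((cs.length : Int) + 1) 1).foldl
          (pvStepBB cs k (cs.length : Int) (pvBuildB cs)) ((0, 0, 0), (cs.length : Int))).2) := by
      constructor
      · rcases hleastB.1 with h | ⟨i, j, hi, hij, hjn, hf, hv⟩
        · rw [h]
          exact pvSBet_top cs k hglob (Nat.zero_le _)
        · exact ⟨i, j, Nat.zero_le _, hij, hjn, hf, hv⟩
      · rintro w ⟨i, j, h0, hij, hjn, hf, hv⟩
        exact hleastB.2 w (Or.inr ⟨i, j, by omega, hij, hjn, hf, hv⟩)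
    exact pvLeast_unique hleastA hBleast
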